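-- pv_equiv track=rewrite | github.com/springin98/Algorithm | 프로그래머스/unrated/138477. 명예의 전당 （1）/명예의 전당 （1）.py | solution
-- ===== SOURCE A (Python) =====
-- def solution(k, score):
--     answer = [];
--     scoreArr = [];
--     for i in range(0, len(score)):
--         scoreArr.append(score[i]);
--         scoreArr.sort()
--         if len(scoreArr) > k:
--             scoreArr.pop(0)
--         answer.append(min(scoreArr))
--
--     return answer
-- ===== SOURCE B (Python) =====
-- def _binsert(top, s):
--     # insert s into ascending list top, in place (bisect_right by hand: no imports)
--     lo, hi = 0, len(top)
--     while lo < hi: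
--         mid = (lo + hi) // 2
--         if s < top[mid]:
--             hi = mid
--         else:
--             lo = mid + 1
--     top.insert(lo, s)
--
-- def solution(k, score):
--     top = []      # ascending list of the (at most k) best scores so far
--     answer = []
--     for s in score:
--         if len(top) < k:
--             _binsert(top, s)
--         elif s > top[0]:
--             top.pop(0)
--             _binsert(top, s)
--         answer.append(top[0])
--     return answer
-- ===== Notes on version B (the rewrite author's own statement) =====
-- stated objective: faster
-- what changed: A re-sorts the whole kept list and calls min() at every step; B keeps an ascending top-k list, skips any score not beating the current threshold top[0] in O(1), and otherwise does one binary-search insertion, reporting top[0] directly.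
import Mathlib
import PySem

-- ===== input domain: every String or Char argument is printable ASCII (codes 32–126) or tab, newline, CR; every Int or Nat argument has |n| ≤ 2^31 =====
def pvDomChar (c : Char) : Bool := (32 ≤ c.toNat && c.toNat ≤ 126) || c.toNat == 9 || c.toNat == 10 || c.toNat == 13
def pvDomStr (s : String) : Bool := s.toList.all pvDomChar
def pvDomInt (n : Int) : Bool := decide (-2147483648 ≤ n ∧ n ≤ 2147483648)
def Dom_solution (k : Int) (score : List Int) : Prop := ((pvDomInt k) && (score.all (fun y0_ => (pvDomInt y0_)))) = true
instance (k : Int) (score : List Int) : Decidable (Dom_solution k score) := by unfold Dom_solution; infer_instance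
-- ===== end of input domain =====

-- B changes the mechanism: no per-step re-sort; an ascending top-k list with an O(1) threshold skip
-- and one binary-search insertion otherwise (objective: faster; measured faster in a timing run).

-- ===== PORT A =====
-- one loop iteration of A: append score[i], sort, pop(0) if too long, append min;
-- min([]) raises in Python (only reachable when k ≤ 0) — ported as .getD 0, excluded by Pre_.
def stepA (k : Int) (st : List Int × List Int) (s : Int) : List Int × List Int :=
  let arr := PySem.List.sorted (st.1 ++ [s]) (fun x => x) false
  let arr := if (arr.length : Int) > k then arr.drop 1 else arr  -- pop(0) on a nonempty list = drop 1
  (arr, st.2 ++ [(PySem.List.min? arr (fun x => x)).getD 0])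

def solution (k : Int) (score : List Int) : List Int :=
  (score.foldl (stepA k) ([], [])).2

-- ===== PORT B =====
-- _binsert: Source B's hand-written 'lo, hi' bisect_right loop is exactly PySem.List.bisectRight's loop
-- (while lo < hi: mid = (lo+hi)//2; if s < top[mid]: hi = mid else lo = mid+1), then list.insert(lo, s)
def binsert (top : List Int) (s : Int) : List Int :=
  PySem.List.insert top ((PySem.List.bisectRight top s : Nat) : Int) s

-- one loop iteration of B; top[0] raises on [] in Python (only reachable when k ≤ 0) —
-- ported as .headD 0, excluded by Pre_.
def stepB (k : Int) (st : List Int × List Int) (s : Int) : List Int × List Int :=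
  let top := st.1
  let top :=
    if (top.length : Int) < k then binsert top s
    else if s > top.headD 0 then binsert (top.drop 1) s
    else top
  (top, st.2 ++ [top.headD 0])

def solution_alt (k : Int) (score : List Int) : List Int :=
  (score.foldl (stepB k) ([], [])).2

-- ===== PRECONDITION & SPEC =====
-- Pre_ excludes exactly the inputs where the Python A raises: with k ≤ 0 and a nonempty score,
-- A's kept list becomes empty and min([]) raises ValueError (B raises IndexError there too).
def Pre_solution (k : Int) (score : List Int) : Prop := score = [] ∨ 1 ≤ k
instance (k : Int) (score : List Int) : Decidable (Pre_solution k score) := by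
  unfold Pre_solution; infer_instance

def pvWitness_solution : Int × List Int := (3, [10, 100, 20, 150, 1, 100, 200])

def Spec_solution (k : Int) (score : List Int) (out : List Int) : Prop := out = solution_alt k score
instance (k : Int) (score : List Int) (out : List Int) : Decidable (Spec_solution k score out) := by
  unfold Spec_solution; infer_instance

-- ===== CLAIM (what is proved, stated in full; the proofs are below) =====
def Claim_equal_solution : Prop := ∀ (k : Int) (score : List Int), Dom_solution k score → Pre_solution k score → Spec_solution k score (solution k score)

-- ===== LEMMAS AND PROOFS =====

-- proof-side ordered insertion; both ports' kept lists are shown to step by it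
def insAsc (s : Int) : List Int → List Int
  | [] => [s]
  | x :: xs => if x ≤ s then x :: insAsc s xs else s :: x :: xs

lemma insAsc_perm (s : Int) (l : List Int) : (insAsc s l).Perm (s :: l) := by
  induction l with
  | nil => simp [insAsc]
  | cons x xs ih =>
    simp only [insAsc]
    split
    · exact (ih.cons x).trans (List.Perm.swap s x xs)
    · exact List.Perm.refl _

lemma mem_insAsc {y s : Int} {l : List Int} : y ∈ insAsc s l ↔ y = s ∨ y ∈ l := by
  rw [(insAsc_perm s l).mem_iff]; simp

lemma length_insAsc (s : Int) (l : List Int) : (insAsc s l).length = l.length + 1 := by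
  simpa using (insAsc_perm s l).length_eq

lemma insAsc_pairwise {s : Int} {l : List Int} (h : l.Pairwise (· ≤ ·)) :
    (insAsc s l).Pairwise (· ≤ ·) := by
  induction l with
  | nil => simp [insAsc]
  | cons x xs ih =>
    rcases List.pairwise_cons.mp h with ⟨hx, hxs⟩
    simp only [insAsc]
    split
    · rename_i hle
      refine List.pairwise_cons.mpr ⟨?_, ih hxs⟩
      intro y hy
      rcases mem_insAsc.mp hy with rfl | hy
      · exact hle
      · exact hx y hy
    · rename_i hgt
      have hsx : s ≤ x := le_of_lt (lt_of_not_ge hgt)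
      refine List.pairwise_cons.mpr ⟨?_, h⟩
      intro y hy
      rcases List.mem_cons.mp hy with rfl | hy
      · exact hsx
      · exact hsx.trans (hx y hy)

lemma insAsc_of_le {x : Int} {l : List Int} (h : ∀ y ∈ l, x ≤ y) : insAsc x l = x :: l := by
  induction l with
  | nil => rfl
  | cons y ys ih =>
    simp only [insAsc]
    split
    · rename_i hyx
      have : y = x := le_antisymm hyx (h y (List.mem_cons_self))
      subst this
      rw [ih (fun z hz => h z (List.mem_cons_of_mem _ hz))]
    · rfl

-- inserting at a bisect_right position of a sorted list is ordered insertion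
lemma insert_pos_eq_insAsc : ∀ (top : List Int) (p : Nat) (s : Int), p ≤ top.length →
    (∀ (j : Nat) (hj : j < top.length), j < p → top[j] ≤ s) →
    (∀ (j : Nat) (hj : j < top.length), p ≤ j → s < top[j]) →
    top.take p ++ s :: top.drop p = insAsc s top := by
  intro top
  induction top with
  | nil =>
    intro p s hp _ _
    have : p = 0 := Nat.le_zero.mp (by simpa using hp)
    subst this
    rfl
  | cons x xs ih =>
    intro p s hp h1 h2
    cases p with
    | zero =>
      have hx : s < x := h2 0 (by simp) (Nat.zero_le 0)
      simp [insAsc, not_le.mpr hx]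
    | succ q =>
      have hxle : x ≤ s := by
        have := h1 0 (by simp) (Nat.succ_pos q)
        simpa using this
      have hq : q ≤ xs.length := by simpa using hp
      have h1' : ∀ (j : Nat) (hj : j < xs.length), j < q → xs[j] ≤ s := by
        intro j hj hjq
        have := h1 (j + 1) (by simpa using Nat.succ_lt_succ hj) (Nat.succ_lt_succ hjq)
        simpa using this
      have h2' : ∀ (j : Nat) (hj : j < xs.length), q ≤ j → s < xs[j] := by
        intro j hj hjq
        have := h2 (j + 1) (by simpa using Nat.succ_lt_succ hj) (Nat.succ_le_succ hjq)
        simpa using this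
      simp only [List.take_succ_cons, List.drop_succ_cons, List.cons_append, insAsc,
        if_pos hxle]
      rw [ih q s hq h1' h2']

lemma binsert_eq_insAsc (s : Int) {top : List Int} (h : top.Pairwise (· ≤ ·)) :
    binsert top s = insAsc s top := by
  obtain ⟨hle, hlo, hhi⟩ := PySem.List.bisectRight_spec top s h
  unfold binsert
  rw [PySem.List.insert_natCast top _ s hle]
  exact insert_pos_eq_insAsc top _ s hle hlo hhi

lemma sorted_append_single {l : List Int} (s : Int) (h : l.Pairwise (· ≤ ·)) :
    PySem.List.sorted (l ++ [s]) (fun x => x) false = insAsc s l := by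
  refine PySem.List.sorted_id_eq_of_perm_of_pairwise _ _ ?_ (insAsc_pairwise h)
  exact (insAsc_perm s l).trans (List.perm_append_singleton s l).symm

lemma foldl_min_eq {x : Int} {l : List Int} (h : ∀ y ∈ l, x ≤ y) : l.foldl min x = x := by
  induction l generalizing x with
  | nil => rfl
  | cons y ys ih =>
    simp only [List.foldl_cons]
    rw [min_eq_left (h y List.mem_cons_self)]
    exact ih (fun z hz => h z (List.mem_cons_of_mem _ hz))

lemma min_sorted_head {l : List Int} (hne : l ≠ []) (h : l.Pairwise (· ≤ ·)) :
    (PySem.List.min? l (fun x => x)).getD 0 = l.headD 0 := by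
  cases l with
  | nil => exact absurd rfl hne
  | cons x xs =>
    rw [PySem.List.min?_id_cons]
    rcases List.pairwise_cons.mp h with ⟨hx, _⟩
    simp [foldl_min_eq hx]

-- one step of A equals one step of B, and the invariant (sorted, length ≤ k) is preserved
lemma step_eq (k : Int) (hk : 1 ≤ k) (arr ans : List Int) (s : Int)
    (hp : arr.Pairwise (· ≤ ·)) (hl : (arr.length : Int) ≤ k) :
    stepA k (arr, ans) s = stepB k (arr, ans) s ∧
    ((stepA k (arr, ans) s).1.Pairwise (· ≤ ·)) ∧
    ((stepA k (arr, ans) s).1.length : Int) ≤ k := by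
  by_cases hlt : (arr.length : Int) < k
  · -- the kept list is still short: both just insert
    have harr : PySem.List.sorted (arr ++ [s]) (fun x => x) false = insAsc s arr :=
      sorted_append_single s hp
    have hlen : ((insAsc s arr).length : Int) = arr.length + 1 := by
      rw [length_insAsc]; push_cast; ring
    have hng : ¬ ((insAsc s arr).length : Int) > k := by rw [hlen]; omega
    have hAarr : (stepA k (arr, ans) s).1 = insAsc s arr := by
      simp [stepA, harr, if_neg hng]
    have hne : insAsc s arr ≠ [] := by
      intro h; have := length_insAsc s arr; rw [h] at this; simp at this
    constructor
    · simp only [stepA, stepB, harr, if_neg hng, if_pos hlt, binsert_eq_insAsc s hp]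
      exact Prod.ext rfl (by
        rw [min_sorted_head hne (insAsc_pairwise hp)])
    · exact ⟨by rw [hAarr]; exact insAsc_pairwise hp, by rw [hAarr, hlen]; omega⟩
  · -- the kept list is full: length = k ≥ 1, so arr = x :: xs
    have hkl : (arr.length : Int) = k := le_antisymm hl (le_of_not_gt hlt)
    cases arr with
    | nil => simp at hkl; omega
    | cons x xs =>
      rcases List.pairwise_cons.mp hp with ⟨hx, hxs⟩
      have harr : PySem.List.sorted ((x :: xs) ++ [s]) (fun x => x) false = insAsc s (x :: xs) :=
        sorted_append_single s hp
      have hlen : ((insAsc s (x :: xs)).length : Int) = k + 1 := by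
        rw [length_insAsc]; omega
      have hg : ((insAsc s (x :: xs)).length : Int) > k := by omega
      -- A's new kept list
      have hdrop : (insAsc s (x :: xs)).drop 1 = if s > x then insAsc s xs else x :: xs := by
        by_cases hsx : s > x
        · have hxle : x ≤ s := le_of_lt hsx
          rw [if_pos hsx]; simp [insAsc, hxle]
        · rw [if_neg hsx]
          by_cases hxle : x ≤ s
          · have : s = x := le_antisymm (le_of_not_gt hsx) hxle
            subst this
            simp [insAsc, insAsc_of_le hx]
          · simp [insAsc, hxle]
      have hAarr : (stepA k (x :: xs, ans) s).1 = if s > x then insAsc s xs else x :: xs := by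
        simp only [stepA, harr, if_pos hg]; exact hdrop
      have hBarr : (stepB k (x :: xs, ans) s).1 = if s > x then insAsc s xs else x :: xs := by
        simp only [stepB, List.headD_cons, List.drop_succ_cons, List.drop_zero,
          binsert_eq_insAsc s hxs]
        rw [if_neg hlt]
      have hp' : (if s > x then insAsc s xs else x :: xs).Pairwise (· ≤ ·) := by
        split
        · exact insAsc_pairwise hxs
        · exact hp
      have hne' : (if s > x then insAsc s xs else x :: xs) ≠ [] := by
        split
        · intro h; have := length_insAsc s xs; rw [h] at this; simp at this
        · simp
      have hlen' : ((if s > x then insAsc s xs else x :: xs).length : Int) ≤ k := by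
        split
        · rw [length_insAsc]; simp at hkl ⊢; omega
        · omega
      refine ⟨?_, by rw [hAarr]; exact hp', by rw [hAarr]; exact hlen'⟩
      have hAans : (stepA k (x :: xs, ans) s).2
          = ans ++ [(if s > x then insAsc s xs else x :: xs).headD 0] := by
        simp only [stepA, harr, if_pos hg, hdrop]
        rw [min_sorted_head hne' hp']
      have hBans : (stepB k (x :: xs, ans) s).2
          = ans ++ [(if s > x then insAsc s xs else x :: xs).headD 0] := by
        simp only [stepB, List.headD_cons, List.drop_succ_cons, List.drop_zero,
          binsert_eq_insAsc s hxs]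
        rw [if_neg hlt]
      exact Prod.ext (hAarr.trans hBarr.symm) (hAans.trans hBans.symm)

lemma foldl_eq (k : Int) (hk : 1 ≤ k) :
    ∀ (score arr ans : List Int), arr.Pairwise (· ≤ ·) → (arr.length : Int) ≤ k →
      score.foldl (stepA k) (arr, ans) = score.foldl (stepB k) (arr, ans) := by
  intro score
  induction score with
  | nil => intro arr ans _ _; rfl
  | cons s rest ih =>
    intro arr ans hp hl
    obtain ⟨heq, hp', hl'⟩ := step_eq k hk arr ans s hp hl
    rw [List.foldl_cons, List.foldl_cons, heq]
    have h2 := ih (stepB k (arr, ans) s).1 (stepB k (arr, ans) s).2 (heq ▸ hp') (heq ▸ hl')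
    simpa using h2

-- ===== VERDICT (by name: the statement is the Claim_ definition above) =====
theorem solution_spec : Claim_equal_solution := by
  intro k score _ hpre
  unfold Spec_solution
  rcases hpre with rfl | hk
  · rfl
  · unfold solution solution_alt
    rw [foldl_eq k hk score [] [] (by simp) (by simp; omega)]
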